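-- pv_equiv track=rewrite | github.com/luke6a52/AdventOfCode | 2023/Day12.py | getNextOptions
-- ===== SOURCE A (Python) =====
-- def getNextOptions(options, groups):
--     nextOptions = {}
--     minLen = sum(groups) + len(groups[1:])
--     maxSum = sum(groups[1:])
--     group = groups[0]
--     for option, count in options.items():
--         for j, spring in enumerate(option):
--             # if ( re.match('^[?\.]{' + j + '}[?#]{' + group + '}[?\.]?(.{' + sum(groups[1:]) + len(groups[2:]) + ',})$', option) ):
--             if (len(option)-j >= minLen and
--                 all([c == '?' or c == '.' for c in option[:j]]) and
--                 all([c == '?' or c == '#' for c in option[j:j+group]]) and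
--                 all([c == '?' or c == '.' for c in option[j+group:j+group+1]]) and
--                 sum([c == '#' for c in option[j+group+1:]]) <= maxSum):
--                 remaining = option[j+group+1:]
--                 y = min(remaining.index('?') if '?' in remaining else len(remaining),
--                         remaining.index('#') if '#' in remaining else len(remaining))
--                 nextOptions[remaining[y:]] = nextOptions.get(remaining[y:], 0) + 1*count
--     return nextOptions
-- ===== SOURCE B (Python) =====
-- def getNextOptions(options, groups):
--     # One O(L) suffix table per option replaces A's per-position slice scans.
--     nextOptions = {}
--     group = groups[0]
--     minLen = sum(groups) + len(groups) - 1
--     maxSum = sum(groups) - group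
--     for option, count in options.items():
--         L = len(option)
--         if L < minLen or maxSum < 0:
--             continue  # no position j can pass the length check / the '#'-suffix bound
--         # tab[i] = (dSeg, dGap, dQH, hashes) for the suffix option[i:], where
--         #   dSeg = length of the longest prefix of option[i:] made of '?'/'#'
--         #   dGap = length of the longest prefix made of '?'/'.'
--         #   dQH  = distance to the first '?' or '#' (len of suffix if none)
--         #   hashes = number of '#' in option[i:]
--         rev = [(0, 0, 0, 0)]
--         for c in reversed(option):
--             dS, dG, dQ, h = rev[-1]
--             rev.append((dS + 1 if (c == '?' or c == '#') else 0,
--                         dG + 1 if (c == '?' or c == '.') else 0,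
--                         0 if (c == '?' or c == '#') else dQ + 1,
--                         h + (1 if c == '#' else 0)))
--         tab = rev[::-1]
--
--         def norm(x):
--             if x < 0:
--                 x += L
--             return min(max(x, 0), L)
--
--         prefOk = True
--         for j, c in enumerate(option):
--             e = norm(j + group)
--             b = norm(j + group + 1)
--             if (L - j >= minLen and prefOk
--                     and j + tab[j][0] >= e
--                     and e + tab[e][1] >= b
--                     and tab[b][3] <= maxSum):
--                 key = option[b + tab[b][2]:]
--                 nextOptions[key] = nextOptions.get(key, 0) + count
--             prefOk = prefOk and (c == '?' or c == '.')
--     return nextOptions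
-- ===== Notes on version B (the rewrite author's own statement) =====
-- stated objective: faster
-- what changed: A re-scans slices of the option at every position j (prefix check, group check, gap check, suffix '#' count, index search), making each option O(L^2); B skips options that cannot satisfy the length/suffix-sum bounds and answers every per-position check in O(1) from one O(L) precomputed suffix table (runs of '?'/'#' and '?'/'.', distance to the next '?'/'#', suffix '#' counts) plus an incrementally maintained prefix-validity flag.
import Mathlib
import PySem

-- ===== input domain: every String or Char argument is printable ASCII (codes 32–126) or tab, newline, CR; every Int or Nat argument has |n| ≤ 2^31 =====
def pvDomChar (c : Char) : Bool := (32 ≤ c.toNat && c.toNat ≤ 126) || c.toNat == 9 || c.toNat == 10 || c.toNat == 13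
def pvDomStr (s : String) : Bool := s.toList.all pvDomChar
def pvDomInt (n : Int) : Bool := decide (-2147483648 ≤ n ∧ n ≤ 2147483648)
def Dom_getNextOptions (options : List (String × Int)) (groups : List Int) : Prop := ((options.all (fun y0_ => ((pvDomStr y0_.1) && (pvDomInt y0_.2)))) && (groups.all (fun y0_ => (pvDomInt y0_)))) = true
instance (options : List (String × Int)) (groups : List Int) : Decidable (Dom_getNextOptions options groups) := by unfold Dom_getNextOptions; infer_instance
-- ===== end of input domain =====

-- B answers each per-position check from one precomputed O(L) suffix table per option instead of A's per-position slice scans; same return value.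


-- ===== PORT A =====
-- inner loop body of A: one position j, the five slice-based checks, then the dict update
def pvAStep (group minLen maxSum : Int) (option : List Char) (count : Int)
    (no : PySem.Dict String Int) (js : Int × Char) : PySem.Dict String Int :=
  let j := js.1
  if (decide ((option.length : Int) - j ≥ minLen)
      && (PySem.List.slice option (some 0) (some j)).all (fun c => c == '?' || c == '.')
      && (PySem.List.slice option (some j) (some (j + group))).all (fun c => c == '?' || c == '#')
      && (PySem.List.slice option (some (j + group)) (some (j + group + 1))).all (fun c => c == '?' || c == '.')
      && decide (((PySem.List.slice option (some (j + group + 1)) none).countP (fun c => c == '#') : Int) ≤ maxSum))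
  then
    let remaining := PySem.List.slice option (some (j + group + 1)) none
    let y := min (if remaining.contains '?' then ((PySem.List.index? remaining '?').getD remaining.length) else remaining.length)
                 (if remaining.contains '#' then ((PySem.List.index? remaining '#').getD remaining.length) else remaining.length)
    let key := String.ofList (remaining.drop y)
    PySem.Dict.insert no key (PySem.Dict.getD no key 0 + 1 * count)
  else no

def getNextOptions (options : List (String × Int)) (groups : List Int) : List (String × Int) :=
  match groups with
  | [] => []  -- Python raises IndexError at groups[0]; excluded by Pre_
  | group :: rest =>
    let minLen : Int := (group :: rest).sum + (rest.length : Int)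
    let maxSum : Int := rest.sum
    (options.foldl (fun no oc =>
        (PySem.List.enumerate oc.1.toList 0).foldl (pvAStep group minLen maxSum oc.1.toList oc.2) no)
      PySem.Dict.empty).items

-- ===== PORT B =====
-- suffix table: tab[i] = (run of '?'/'#' at i, run of '?'/'.' at i, distance to first '?'/'#' at i, number of '#' from i)
def pvStep (c : Char) (t : List (Nat × Nat × Nat × Int)) : List (Nat × Nat × Nat × Int) :=
  match t with
  | [] => []
  | (dS, dG, dQ, h) :: _ =>
      (if c == '?' || c == '#' then dS + 1 else 0,
       if c == '?' || c == '.' then dG + 1 else 0,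
       if c == '?' || c == '#' then 0 else dQ + 1,
       h + (if c == '#' then 1 else 0)) :: t
def pvTab (cs : List Char) : List (Nat × Nat × Nat × Int) := cs.foldr pvStep [(0, 0, 0, 0)]
def pvNorm (L : Nat) (x : Int) : Nat :=
  let x' := if x < 0 then x + L else x
  (min (max x' 0) (L : Int)).toNat

def pvBStep (group minLen maxSum : Int) (cs : List Char) (count : Int)
    (L : Nat) (tab : List (Nat × Nat × Nat × Int))
    (st : PySem.Dict String Int × Bool) (jc : Int × Char) : PySem.Dict String Int × Bool :=
  let j := jc.1
  let e := pvNorm L (j + group)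
  let b := pvNorm L (j + group + 1)
  let tj := tab.getD j.toNat (0, 0, 0, 0)
  let te := tab.getD e (0, 0, 0, 0)
  let tb := tab.getD b (0, 0, 0, 0)
  let no :=
    if (decide ((L : Int) - j ≥ minLen) && st.2
        && decide (e ≤ j.toNat + tj.1) && decide (b ≤ e + te.2.1) && decide (tb.2.2.2 ≤ maxSum))
    then
      let key := String.ofList (cs.drop (b + tb.2.2.1))
      PySem.Dict.insert st.1 key (PySem.Dict.getD st.1 key 0 + count)
    else st.1
  (no, st.2 && (jc.2 == '?' || jc.2 == '.'))

def getNextOptions_alt (options : List (String × Int)) (groups : List Int) : List (String × Int) :=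
  match groups with
  | [] => []  -- Python raises IndexError at groups[0]; excluded by Pre_
  | group :: rest =>
    let minLen : Int := (group :: rest).sum + ((group :: rest).length : Int) - 1
    let maxSum : Int := (group :: rest).sum - group
    (options.foldl (fun no oc =>
        if decide ((oc.1.toList.length : Int) < minLen) || decide (maxSum < 0) then no  -- 'continue': no j can pass
        else
          ((PySem.List.enumerate oc.1.toList 0).foldl
            (pvBStep group minLen maxSum oc.1.toList oc.2 oc.1.toList.length (pvTab oc.1.toList))
            (no, true)).1)
      PySem.Dict.empty).items

-- ===== PRECONDITION & SPEC =====
-- Pre_ excludes empty groups (Python A raises IndexError at groups[0]) and option lists with duplicate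
-- keys, which cannot arise from a Python dict argument (the assoc-list port would count collapsed entries twice).
def Pre_getNextOptions (options : List (String × Int)) (groups : List Int) : Prop :=
  groups ≠ [] ∧ (options.map Prod.fst).Nodup
instance (options : List (String × Int)) (groups : List Int) : Decidable (Pre_getNextOptions options groups) := by unfold Pre_getNextOptions; infer_instance
def pvWitness_getNextOptions : (List (String × Int)) × List Int := ([("?#?.", 2), ("##", 1)], [1, 1])

def Spec_getNextOptions (options : List (String × Int)) (groups : List Int) (out : List (String × Int)) : Prop := out = getNextOptions_alt options groups
instance (options : List (String × Int)) (groups : List Int) (out : List (String × Int)) : Decidable (Spec_getNextOptions options groups out) := by unfold Spec_getNextOptions; infer_instance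

-- ===== CLAIM (what is proved, stated in full; the proofs are below) =====
def Claim_equal_getNextOptions : Prop := ∀ (options : List (String × Int)) (groups : List Int), Dom_getNextOptions options groups → Pre_getNextOptions options groups → Spec_getNextOptions options groups (getNextOptions options groups)

-- ===== LEMMAS AND PROOFS =====

-- the value pvTab holds at index i: the four suffix statistics of cs.drop i
def pvSpec (cs : List Char) : Nat × Nat × Nat × Int :=
  ((cs.takeWhile (fun c => c == '?' || c == '#')).length,
   (cs.takeWhile (fun c => c == '?' || c == '.')).length,
   (cs.takeWhile (fun c => !(c == '?' || c == '#'))).length,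
   (cs.countP (fun c => c == '#') : Int))

theorem pvTab_cons (c : Char) (cs : List Char) :
    pvTab (c :: cs) = pvSpec (c :: cs) :: pvTab cs := by
  induction cs generalizing c with
  | nil =>
      show pvStep c (pvTab []) = _
      simp only [pvTab, List.foldr_nil, pvStep, pvSpec]
      by_cases h1 : c = '?' <;> by_cases h2 : c = '#' <;> by_cases h3 : c = '.' <;>
        simp [h1, h2, h3]
  | cons d ds ih =>
      show pvStep c (pvTab (d :: ds)) = _
      rw [ih d]
      simp only [pvStep, pvSpec, List.takeWhile_cons, List.countP_cons]
      by_cases h1 : c = '?' <;> by_cases h2 : c = '#' <;> by_cases h3 : c = '.' <;>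
        simp [h1, h2, h3]

theorem pvTab_getD (cs : List Char) (i : Nat) (h : i ≤ cs.length) :
    (pvTab cs).getD i (0, 0, 0, 0) = pvSpec (cs.drop i) := by
  induction cs generalizing i with
  | nil =>
      simp only [List.length_nil, Nat.le_zero] at h
      subst h; simp [pvTab, pvSpec]
  | cons c cs ih =>
      rw [pvTab_cons]
      cases i with
      | zero => simp
      | succ i => simpa using ih i (by simpa using h)

theorem pv_take_all (l : List Char) (p : Char → Bool) (m : Nat) :
    (l.take m).all p = decide (min m l.length ≤ (l.takeWhile p).length) := by
  induction l generalizing m with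
  | nil => simp
  | cons c l ih =>
      cases m with
      | zero => simp
      | succ m =>
          simp only [List.take_succ_cons, List.takeWhile_cons, List.length_cons]
          by_cases hp : p c <;> simp [hp, ih]

theorem pv_idx_one (l : List Char) (a : Char) :
    (if l.contains a then ((PySem.List.index? l a).getD l.length) else l.length)
      = (l.takeWhile (fun c => !(c == a))).length := by
  induction l with
  | nil => simp
  | cons c l ih =>
      by_cases h : c = a
      · subst h
        rw [PySem.List.index?_cons_self]
        simp
      · have hne : (c == a) = false := by simpa using h
        have hne' : (a == c) = false := by simpa using (Ne.symm h)
        simp only [List.contains_cons, hne', Bool.false_or, List.takeWhile_cons, hne,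
          Bool.not_false, List.length_cons]
        by_cases hc : l.contains a
        · obtain ⟨k, hk⟩ : ∃ k, PySem.List.index? l a = some k := by
            have := (PySem.List.index?_isSome_iff (xs := l) (v := a)).mpr (by simpa using hc)
            exact Option.isSome_iff_exists.mp this
          rw [PySem.List.index?_cons_of_ne l h, hk]
          simp only [hc, if_true, hk, Option.getD_some] at ih
          have hm : a ∈ l := by simpa using hc
          simp [hm, ih]
        · have ho : PySem.List.index? l a = none := by
            rw [PySem.List.index?_eq_none_iff]; simpa using hc
          rw [PySem.List.index?_cons_of_ne l h, ho]
          rw [if_neg hc] at ih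
          simp [ih]

theorem pv_min_takeWhile (l : List Char) (p q : Char → Bool) :
    min (l.takeWhile p).length (l.takeWhile q).length
      = (l.takeWhile (fun c => p c && q c)).length := by
  induction l with
  | nil => simp
  | cons c l ih =>
      by_cases hp : p c <;> by_cases hq : q c <;>
        simp [hp, hq, ← ih]

theorem pvNorm_eq' (L : Nat) (x : Int) : pvNorm L x = PySem.List.clampIdx L x := by
  simp only [pvNorm, PySem.List.clampIdx]
  split_ifs <;> omega

theorem pv_slice_clamp {α : Type} (xs : List α) (a b : Int) :
    PySem.List.slice xs (some a) (some b)
      = (xs.drop (PySem.List.clampIdx xs.length a)).take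
          (PySem.List.clampIdx xs.length b - PySem.List.clampIdx xs.length a) := by
  simp [PySem.List.slice]

theorem pv_step_eq (group minLen maxSum : Int) (cs : List Char) (count : Int) (k : Nat) (c : Char)
    (hk : k < cs.length) (hc : cs[k]? = some c) (no : PySem.Dict String Int) :
    pvBStep group minLen maxSum cs count cs.length (pvTab cs)
        (no, (cs.take k).all (fun c => c == '?' || c == '.')) ((k : Int), c)
      = (pvAStep group minLen maxSum cs count no ((k : Int), c),
         (cs.take (k + 1)).all (fun c => c == '?' || c == '.')) := by
  -- flag update
  have hflag : (cs.take (k + 1)).all (fun c => c == '?' || c == '.')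
      = ((cs.take k).all (fun c => c == '?' || c == '.') && (c == '?' || c == '.')) := by
    rw [List.take_add_one, hc]
    simp
  -- clamp values
  have hck : PySem.List.clampIdx cs.length ((k : Int)) = k := by
    rw [PySem.List.clampIdx_natCast]; omega
  set e := pvNorm cs.length ((k : Int) + group) with hedef
  set b := pvNorm cs.length ((k : Int) + group + 1) with hbdef
  have hee : e = PySem.List.clampIdx cs.length ((k : Int) + group) := pvNorm_eq' cs.length _
  have hbb : b = PySem.List.clampIdx cs.length ((k : Int) + group + 1) := pvNorm_eq' cs.length _
  have heL : e ≤ cs.length := by rw [hee]; exact PySem.List.clampIdx_le _ _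
  have hbL : b ≤ cs.length := by rw [hbb]; exact PySem.List.clampIdx_le _ _
  -- table entries
  have htj : (pvTab cs).getD k (0,0,0,0) = pvSpec (cs.drop k) :=
    pvTab_getD cs k (by omega)
  have hte : (pvTab cs).getD e (0,0,0,0) = pvSpec (cs.drop e) := pvTab_getD cs e heL
  have htb : (pvTab cs).getD b (0,0,0,0) = pvSpec (cs.drop b) := pvTab_getD cs b hbL
  -- A-side slices
  have hs1 : PySem.List.slice cs (some 0) (some ((k : Int))) = cs.take k := by
    rw [PySem.List.slice_zero_start, PySem.List.slice_to_natCast]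
  have hs2 : PySem.List.slice cs (some ((k : Int))) (some ((k : Int) + group))
      = (cs.drop k).take (e - k) := by
    rw [pv_slice_clamp, hck, ← hee]
  have hs3 : PySem.List.slice cs (some ((k : Int) + group)) (some ((k : Int) + group + 1))
      = (cs.drop e).take (b - e) := by
    rw [pv_slice_clamp, ← hee, ← hbb]
  have hs4 : PySem.List.slice cs (some ((k : Int) + group 
+ 1)) none = cs.drop b := by
    rw [PySem.List.slice_some_none, ← hbb]
  -- condition equalities
  have twle : ∀ (l : List Char) (p : Char → Bool), (l.takeWhile p).length ≤ l.length :=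
    fun l p => (List.takeWhile_sublist _).length_le
  have hc3 : ((cs.drop k).take (e - k)).all (fun c => c == '?' || c == '#')
      = decide (e ≤ k + ((cs.drop k).takeWhile (fun c => c == '?' || c == '#')).length) := by
    rw [pv_take_all]
    have h1 := twle (cs.drop k) (fun c => c == '?' || c == '#')
    simp only [List.length_drop] at h1 ⊢
    rw [decide_eq_decide]
    omega
  have hc4 : ((cs.drop e).take (b - e)).all (fun c => c == '?' || c == '.')
      = decide (b ≤ e + ((cs.drop e).takeWhile (fun c => c == '?' || c == '.')).length) := by
    rw [pv_take_all]
    have h1 := twle (cs.drop e) (fun c => c == '?' || c == '.')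
    simp only [List.length_drop] at h1 ⊢
    rw [decide_eq_decide]
    omega
  -- key equality
  have hkey : min (if (cs.drop b).contains '?' then ((PySem.List.index? (cs.drop b) '?').getD (cs.drop b).length) else (cs.drop b).length)
                  (if (cs.drop b).contains '#' then ((PySem.List.index? (cs.drop b) '#').getD (cs.drop b).length) else (cs.drop b).length)
      = ((cs.drop b).takeWhile (fun c => !(c == '?' || c == '#'))).length := by
    rw [pv_idx_one, pv_idx_one, pv_min_takeWhile]
    simp only [Bool.not_or]
  have hdd : ∀ y : Nat, (cs.drop b).drop y = cs.drop (b + y) := by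
    intro y; rw [List.drop_drop]
  -- main
  simp only [pvBStep, pvAStep, hflag, htj, hte, htb, hs1, hs2, hs3, hs4, hc3, hc4, pvSpec,
    hkey, hdd, one_mul, ← hedef, ← hbdef, Int.toNat_natCast]

theorem pv_fold_eq (group minLen maxSum : Int) (cs : List Char) (count : Int) :
    ∀ (l : List Char) (k : Nat) (no : PySem.Dict String Int), l = cs.drop k →
      ((PySem.List.enumerate l (k : Int)).foldl
          (pvBStep group minLen maxSum cs count cs.length (pvTab cs))
          (no, (cs.take k).all (fun c => c == '?' || c == '.'))).1
        = (PySem.List.enumerate l (k : Int)).foldl (pvAStep group minLen maxSum cs count) no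
  | [], k, no, h => by simp [PySem.List.enumerate_nil]
  | c :: l, k, no, h => by
      have hk : k < cs.length := by
        by_contra hge
        rw [List.drop_eq_nil_of_le (by omega)] at h
        exact List.cons_ne_nil _ _ h
      have hc : cs[k]? = some c := by
        have h0 : (cs.drop k)[0]? = some c := by rw [← h]; rfl
        rwa [List.getElem?_drop, Nat.add_zero] at h0
      have hl : l = cs.drop (k + 1) := by
        have := congrArg List.tail h
        simpa [List.tail_drop] using this
      rw [PySem.List.enumerate_cons, List.foldl_cons, List.foldl_cons,
        pv_step_eq group minLen maxSum cs count k c hk hc no,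
        show (k : Int) + 1 = ((k + 1 : Nat) : Int) by push_cast; ring]
      exact pv_fold_eq group minLen maxSum cs count l (k + 1) _ hl

theorem pv_option_eq (group minLen maxSum : Int) (cs : List Char) (count : Int)
    (no : PySem.Dict String Int) :
    ((PySem.List.enumerate cs 0).foldl
        (pvBStep group minLen maxSum cs count cs.length (pvTab cs)) (no, true)).1
      = (PySem.List.enumerate cs 0).foldl (pvAStep group minLen maxSum cs count) no := by
  have := pv_fold_eq group minLen maxSum cs count cs 0 no rfl
  simpa using this

theorem pv_skip (group minLen maxSum : Int) (cs : List Char) (count : Int)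
    (h : (cs.length : Int) < minLen ∨ maxSum < 0) :
    ∀ (l : List Char) (k : Nat) (no : PySem.Dict String Int),
      (PySem.List.enumerate l (k : Int)).foldl (pvAStep group minLen maxSum cs count) no = no
  | [], k, no => by simp [PySem.List.enumerate_nil]
  | c :: l, k, no => by
      rw [PySem.List.enumerate_cons, List.foldl_cons]
      have hstep : pvAStep group minLen maxSum cs count no ((k : Int), c) = no := by
        unfold pvAStep
        rw [if_neg]
        rcases h with h | h
        · have h1 : ¬ ((cs.length : Int) - (k : Int) ≥ minLen) := by omega
          simp [h1]
        · have h5 : ¬ (((PySem.List.slice cs (some ((k : Int) + group + 1)) none).countP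
              (fun c => c == '#') : Int) ≤ maxSum) := by
            have := Int.natCast_nonneg ((PySem.List.slice cs (some ((k : Int) + group + 1)) none).countP (fun c => c == '#'))
            omega
          simp [h5]
      rw [hstep, show (k : Int) + 1 = ((k + 1 : Nat) : Int) by push_cast; ring]
      exact pv_skip group minLen maxSum cs count h l (k + 1) no

theorem pv_outer_eq (g mL mS : Int) :
    ∀ (opts : List (String × Int)) (d : PySem.Dict String Int),
      opts.foldl (fun no oc =>
          if decide ((oc.1.toList.length : Int) < mL) || decide (mS < 0) then no
          else
            ((PySem.List.enumerate oc.1.toList 0).foldl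
              (pvBStep g mL mS oc.1.toList oc.2 oc.1.toList.length (pvTab oc.1.toList))
              (no, true)).1) d
        = opts.foldl (fun no oc =>
            (PySem.List.enumerate oc.1.toList 0).foldl (pvAStep g mL mS oc.1.toList oc.2) no) d
  | [], d => rfl
  | oc :: opts, d => by
      rw [List.foldl_cons, List.foldl_cons]
      by_cases hg : ((oc.1.toList.length : Int) < mL ∨ mS < 0)
      · have hb : (decide ((oc.1.toList.length : Int) < mL) || decide (mS < 0)) = true := by
          simpa [decide_eq_true_eq] using hg
        rw [hb]
        have ha := pv_skip g mL mS oc.1.toList oc.2 hg oc.1.toList 0 d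
        simp only [Nat.cast_zero] at ha
        rw [if_pos rfl, ha]
        exact pv_outer_eq g mL mS opts d
      · have hb : (decide ((oc.1.toList.length : Int) < mL) || decide (mS < 0)) = false := by
          push Not at hg
          simp only [Bool.or_eq_false_iff, decide_eq_false_iff_not]
          exact ⟨not_lt.mpr hg.1, not_lt.mpr hg.2⟩
        rw [hb]
        rw [if_neg (by simp), pv_option_eq]
        exact pv_outer_eq g mL mS opts _

-- ===== VERDICT (by name: the statement is the Claim_ definition above) =====
theorem getNextOptions_spec : Claim_equal_getNextOptions := by
  intro options groups hdom hpre
  unfold Spec_getNextOptions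
  obtain ⟨hne, -⟩ := hpre
  cases groups with
  | nil => exact absurd rfl hne
  | cons g rest =>
    simp only [getNextOptions, getNextOptions_alt]
    have hm : (g :: rest).sum + ((g :: rest).length : Int) - 1
        = (g :: rest).sum + (rest.length : Int) := by
      simp only [List.length_cons]; push_cast; ring
    have hs : (g :: rest).sum - g = rest.sum := by
      simp only [List.sum_cons]; ring
    rw [hm, hs, pv_outer_eq]
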